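-- pv_equiv track=rewrite | github.com/bichotarmarket-alt/tunes | services/user_logger.py | _is_system_account
-- ===== SOURCE A (Python) =====
-- def _is_system_account(username: str) -> bool:
--     """Verifica se é uma conta de sistema (monitoramento, etc)"""
--     if not username:
--         return False
--     system_patterns = [
--         'ativos', 'payout', 'monitor', 'system', 'admin',
--         'test', 'demo_system', 'bot'
--     ]
--     username_lower = username.lower()
--     return any(pattern in username_lower for pattern in system_patterns)
-- ===== SOURCE B (Python) =====
-- _TOKENS = ('ativos', 'payout', 'monitor', 'system', 'admin',
--            'test', 'demo_system', 'bot')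
--
--
-- def _is_system_account(username: str) -> bool:
--     """One left-to-right scan: at each position, try to match a token there."""
--     s = username.lower()
--     for i in range(len(s)):
--         for tok in _TOKENS:
--             if s.startswith(tok, i):
--                 return True
--     return False
-- ===== Notes on version B (the rewrite author's own statement) =====
-- stated objective: alternative
-- what changed: Replaces the any()-of-eight-substring-membership-tests with a single left-to-right scan that, at each position of the lowercased string, tries to match one of the eight tokens as a prefix of the remaining suffix.
import Mathlib
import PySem

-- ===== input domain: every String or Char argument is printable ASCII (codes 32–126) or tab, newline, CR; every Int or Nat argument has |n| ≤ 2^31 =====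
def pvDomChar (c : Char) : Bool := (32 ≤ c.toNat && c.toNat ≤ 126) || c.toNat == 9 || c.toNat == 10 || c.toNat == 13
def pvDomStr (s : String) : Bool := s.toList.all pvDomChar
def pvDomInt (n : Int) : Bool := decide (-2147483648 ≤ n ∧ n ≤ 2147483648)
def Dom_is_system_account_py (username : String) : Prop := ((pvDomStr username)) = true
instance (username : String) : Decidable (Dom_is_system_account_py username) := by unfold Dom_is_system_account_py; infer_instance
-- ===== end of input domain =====

-- B replaces eight separate substring-membership tests with a single positional scan; objective: alternative (same cost).

-- ===== PORT A =====
def is_system_account_py (username : String) : Bool :=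
  if username = "" then false
  else
    let system_patterns : List String :=
      ["ativos", "payout", "monitor", "system", "admin", "test", "demo_system", "bot"]
    let username_lower := PySem.Str.lower username
    system_patterns.any (fun pattern => PySem.Str.isIn pattern username_lower)

-- ===== PORT B =====
def pvTokens : List (List Char) :=
  ["ativos".toList, "payout".toList, "monitor".toList, "system".toList,
   "admin".toList, "test".toList, "demo_system".toList, "bot".toList]

-- the i-loop of Source B: walk the suffixes of the lowered string, trying each token as a prefix
def pvScan : List Char → Bool
  | [] => false
  | c :: rest =>
      (pvTokens.any (fun tok => PySem.Chars.startswith (c :: rest) tok)) || pvScan rest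

def is_system_account_py_alt (username : String) : Bool :=
  pvScan (PySem.Chars.lower username.toList)

-- ===== PRECONDITION & SPEC =====
def Spec_is_system_account_py (username : String) (out : Bool) : Prop := out = is_system_account_py_alt username
instance (username : String) (out : Bool) : Decidable (Spec_is_system_account_py username out) := by unfold Spec_is_system_account_py; infer_instance

-- ===== CLAIM (what is proved, stated in full; the proofs are below) =====
def Claim_equal_is_system_account_py : Prop := ∀ (username : String), Dom_is_system_account_py username → Spec_is_system_account_py username (is_system_account_py username)

-- ===== LEMMAS AND PROOFS =====

theorem pv_isIn_cons (t : List Char) (c : Char) (rest : List Char) :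
    PySem.Chars.isIn t (c :: rest)
      = (PySem.Chars.startswith (c :: rest) t || PySem.Chars.isIn t rest) := by
  rw [Bool.eq_iff_iff]
  simp [PySem.Chars.isIn_iff_infix, PySem.Chars.startswith_iff, List.infix_cons_iff]

theorem pv_any_isIn_cons (toks : List (List Char)) (c : Char) (rest : List Char) :
    toks.any (fun t => PySem.Chars.isIn t (c :: rest))
      = (toks.any (fun t => PySem.Chars.startswith (c :: rest) t)
          || toks.any (fun t => PySem.Chars.isIn t rest)) := by
  induction toks with
  | nil => rfl
  | cons t ts ih =>
      simp only [List.any_cons]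
      rw [ih, pv_isIn_cons, Bool.eq_iff_iff]
      simp only [Bool.or_eq_true]
      tauto

theorem pv_tokens_isIn_nil : pvTokens.any (fun t => PySem.Chars.isIn t []) = false := by
  decide

theorem pvScan_eq (s : List Char) :
    pvScan s = pvTokens.any (fun t => PySem.Chars.isIn t s) := by
  induction s with
  | nil => exact pv_tokens_isIn_nil.symm
  | cons c rest ih =>
      rw [pvScan, ih, pv_any_isIn_cons]

theorem ports_eq (username : String) :
    is_system_account_py username = is_system_account_py_alt username := by
  unfold is_system_account_py is_system_account_py_alt
  by_cases h : username = ""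
  · subst h; decide
  · simp only [if_neg h, pvScan_eq, pvTokens]
    simp [PySem.Str.isIn, PySem.Str.lower]

-- ===== VERDICT (by name: the statement is the Claim_ definition above) =====
theorem is_system_account_py_spec : Claim_equal_is_system_account_py := by
  intro username _
  unfold Spec_is_system_account_py
  exact ports_eq username
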